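-- pv_equiv track=rewrite | github.com/HardisonCo/HMS-A2A | src/crohns-treatment-system/src/coordination/genetic-engine/enhanced_genetic_engine.py | _treatment_matches_abstraction
-- ===== SOURCE A (Python) =====
-- def _treatment_matches_abstraction(treatment_plan, abstraction):
--     """
--     Check if treatment plan matches an abstraction.
--
--     Args:
--         treatment_plan: Treatment plan dictionary
--         abstraction: Abstraction dictionary
--
--     Returns:
--         Boolean indicating whether the treatment matches
--     """
--     # Search for medication names in the abstraction
--     medications = ["Infliximab", "Adalimumab", "Ustekinumab", "Vedolizumab", "Upadacitinib",
--                   "Tofacitinib", "Risankizumab", "Certolizumab", "Golimumab", "Prednisone"]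
--
--     for treatment in treatment_plan:
--         treatment_med = treatment.get("medication", "").lower()
--
--         # Check if this medication is mentioned in the abstraction
--         if treatment_med in abstraction["description"].lower():
--             return True
--
--         # Check if medication is mentioned by brand names
--         if treatment_med == "infliximab" and any(term in abstraction["description"].lower() for term in ["remicade", "inflectra", "renflexis"]):
--             return True
--         elif treatment_med == "adalimumab" and any(term in abstraction["description"].lower() for term in ["humira", "amjevita"]):
--             return True
--         elif treatment_med == "ustekinumab" and "stelara" in abstraction["description"].lower():
--             return True
--         elif treatment_med == "vedolizumab" and "entyvio" in abstraction["description"].lower():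
--             return True
--
--     return False
-- ===== SOURCE B (Python) =====
-- _SYNONYMS = {
--     "infliximab": ("remicade", "inflectra", "renflexis"),
--     "adalimumab": ("humira", "amjevita"),
--     "ustekinumab": ("stelara",),
--     "vedolizumab": ("entyvio",),
-- }
--
--
-- def _treatment_matches_abstraction(treatment_plan, abstraction):
--     if not treatment_plan:
--         return False
--     description = abstraction["description"].lower()
--     # Stage 1: the distinct medications of the plan, as a set.
--     meds = {t.get("medication", "").lower() for t in treatment_plan}
--     # Stage 2: expand every medication to its search terms (itself + brand names).
--     terms = set()
--     for med in meds:
--         terms.add(med)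
--         terms.update(_SYNONYMS.get(med, ()))
--     # Stage 3: one substring scan of the description over the whole term set.
--     return any(term in description for term in terms)
-- ===== Notes on version B (the rewrite author's own statement) =====
-- stated objective: alternative
-- what changed: Replaces A's per-treatment loop with its five-branch if/elif chain (re-lowercasing the description inside every condition) by a staged set pipeline: collect the distinct lowered medications into a set, expand that set once into a set of search terms (medication plus brand names), and decide with a single any() substring scan of the once-lowered description; correctness relies on the result being a pure disjunction, so deduplication and order do not matter.
import Mathlib
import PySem

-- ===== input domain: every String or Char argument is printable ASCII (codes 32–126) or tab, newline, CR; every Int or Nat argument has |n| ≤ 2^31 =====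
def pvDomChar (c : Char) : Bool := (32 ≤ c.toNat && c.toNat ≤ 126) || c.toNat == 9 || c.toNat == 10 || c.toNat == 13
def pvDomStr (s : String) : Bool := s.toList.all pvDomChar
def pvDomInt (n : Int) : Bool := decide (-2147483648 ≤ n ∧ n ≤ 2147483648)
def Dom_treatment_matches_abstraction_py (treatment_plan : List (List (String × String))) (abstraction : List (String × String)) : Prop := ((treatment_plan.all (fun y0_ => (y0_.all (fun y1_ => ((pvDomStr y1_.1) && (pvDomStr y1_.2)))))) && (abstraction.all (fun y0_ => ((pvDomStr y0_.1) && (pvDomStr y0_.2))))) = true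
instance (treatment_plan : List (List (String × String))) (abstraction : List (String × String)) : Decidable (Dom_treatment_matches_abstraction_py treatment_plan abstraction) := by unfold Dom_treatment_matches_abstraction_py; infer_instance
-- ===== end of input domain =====

-- B replaces the per-treatment branch chain by a staged set pipeline (distinct meds → term set → one scan); same return value wherever A returns.

-- shared association-list lookup (Python dict.get over the List (K×V) encoding; first match)
def pyLookup (d : List (String × String)) (k : String) : Option String :=
  (d.find? (fun p => p.1 == k)).map (·.2)

def pyGetD (d : List (String × String)) (k dflt : String) : String :=
  (pyLookup d k).getD dflt

-- ===== PORT A =====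
-- `abstraction["description"]` raises KeyError when absent; Pre_ excludes exactly that
-- (the port reads the missing key as "" there, outside the claim's domain).
def aLoop (abstraction : List (String × String)) : List (List (String × String)) → Bool
  | [] => false
  | t :: rest =>
    let med := PySem.Str.lower (pyGetD t "medication" "")
    let desc := PySem.Str.lower (pyGetD abstraction "description" "")
    if PySem.Str.isIn med desc then true
    else if med == "infliximab" && (["remicade", "inflectra", "renflexis"].any (fun s => PySem.Str.isIn s desc)) then true
    else if med == "adalimumab" && (["humira", "amjevita"].any (fun s => PySem.Str.isIn s desc)) then true
    else if med == "ustekinumab" && PySem.Str.isIn "stelara" desc then true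
    else if med == "vedolizumab" && PySem.Str.isIn "entyvio" desc then true
    else aLoop abstraction rest

def treatment_matches_abstraction_py (treatment_plan : List (List (String × String))) (abstraction : List (String × String)) : Bool :=
  aLoop abstraction treatment_plan

-- ===== PORT B =====
def bSynonyms : List (String × List String) :=
  [("infliximab", ["remicade", "inflectra", "renflexis"]),
   ("adalimumab", ["humira", "amjevita"]),
   ("ustekinumab", ["stelara"]),
   ("vedolizumab", ["entyvio"])]

-- _SYNONYMS.get(med, ())
def bSynGet (med : String) : List String :=
  ((bSynonyms.find? (fun p => p.1 == med)).map (·.2)).getD []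

-- loop body: terms.add(med); terms.update(_SYNONYMS.get(med, ()))
def bStep (terms : PySem.Set String) (med : String) : PySem.Set String :=
  PySem.Set.update (PySem.Set.add terms med) (bSynGet med)

def treatment_matches_abstraction_py_alt (treatment_plan : List (List (String × String))) (abstraction : List (String × String)) : Bool :=
  if treatment_plan.isEmpty then false
  else
    let description := PySem.Str.lower (pyGetD abstraction "description" "")
    let meds : PySem.Set String :=
      PySem.Set.ofList (treatment_plan.map (fun t => PySem.Str.lower (pyGetD t "medication" "")))
    let terms : PySem.Set String := meds.foldl bStep PySem.Set.empty
    terms.any (fun term => PySem.Str.isIn term description)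

-- ===== PRECONDITION & SPEC =====
-- Pre_ excludes only the inputs on which A raises KeyError: a non-empty plan with no "description" key.
def Pre_treatment_matches_abstraction_py (treatment_plan : List (List (String × String))) (abstraction : List (String × String)) : Prop :=
  treatment_plan = [] ∨ (abstraction.any (fun p => p.1 == "description")) = true
instance (treatment_plan : List (List (String × String))) (abstraction : List (String × String)) : Decidable (Pre_treatment_matches_abstraction_py treatment_plan abstraction) := by unfold Pre_treatment_matches_abstraction_py; infer_instance

def pvWitness_treatment_matches_abstraction_py : (List (List (String × String))) × (List (String × String)) :=
  ([[("medication", "Adalimumab")]], [("description", "Patient responded to HUMIRA therapy")])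

def Spec_treatment_matches_abstraction_py (treatment_plan : List (List (String × String))) (abstraction : List (String × String)) (out : Bool) : Prop := out = treatment_matches_abstraction_py_alt treatment_plan abstraction
instance (treatment_plan : List (List (String × String))) (abstraction : List (String × String)) (out : Bool) : Decidable (Spec_treatment_matches_abstraction_py treatment_plan abstraction out) := by unfold Spec_treatment_matches_abstraction_py; infer_instance

-- ===== CLAIM (what is proved, stated in full; the proofs are below) =====
def Claim_equal_treatment_matches_abstraction_py : Prop := ∀ (treatment_plan : List (List (String × String))) (abstraction : List (String × String)), Dom_treatment_matches_abstraction_py treatment_plan abstraction → Pre_treatment_matches_abstraction_py treatment_plan abstraction → Spec_treatment_matches_abstraction_py treatment_plan abstraction (treatment_matches_abstraction_py treatment_plan abstraction)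

-- ===== LEMMAS AND PROOFS =====

-- a five-way if-return chain is the disjunction of its conditions
lemma ifchain (c1 c2 c3 c4 c5 r : Bool) :
    (if c1 then true else if c2 then true else if c3 then true
     else if c4 then true else if c5 then true else r)
      = (c1 || (c2 || c3 || c4 || c5) || r) := by
  cases c1 <;> cases c2 <;> cases c3 <;> cases c4 <;> cases c5 <;> simp

-- the synonym-table lookup equals A's if/elif brand-name chain, per medication
lemma synGet_any (med : String) (g : String → Bool) :
    (bSynGet med).any g =
      ((med == "infliximab" && (["remicade", "inflectra", "renflexis"].any g)) ||
       (med == "adalimumab" && (["humira", "amjevita"].any g)) ||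
       (med == "ustekinumab" && g "stelara") ||
       (med == "vedolizumab" && g "entyvio")) := by
  by_cases h1 : "infliximab" = med
  · subst h1; simp [bSynGet, bSynonyms]
  by_cases h2 : "adalimumab" = med
  · subst h2; simp [bSynGet, bSynonyms]
  by_cases h3 : "ustekinumab" = med
  · subst h3; simp [bSynGet, bSynonyms]
  by_cases h4 : "vedolizumab" = med
  · subst h4; simp [bSynGet, bSynonyms]
  · have e1 : ("infliximab" == med) = false := Bool.eq_false_iff.mpr (fun hb => h1 (eq_of_beq hb))
    have e2 : ("adalimumab" == med) = false := Bool.eq_false_iff.mpr (fun hb => h2 (eq_of_beq hb))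
    have e3 : ("ustekinumab" == med) = false := Bool.eq_false_iff.mpr (fun hb => h3 (eq_of_beq hb))
    have e4 : ("vedolizumab" == med) = false := Bool.eq_false_iff.mpr (fun hb => h4 (eq_of_beq hb))
    have r1 : (med == "infliximab") = false := Bool.eq_false_iff.mpr (fun hb => h1 (eq_of_beq hb).symm)
    have r2 : (med == "adalimumab") = false := Bool.eq_false_iff.mpr (fun hb => h2 (eq_of_beq hb).symm)
    have r3 : (med == "ustekinumab") = false := Bool.eq_false_iff.mpr (fun hb => h3 (eq_of_beq hb).symm)
    have r4 : (med == "vedolizumab") = false := Bool.eq_false_iff.mpr (fun hb => h4 (eq_of_beq hb).symm)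
    simp [bSynGet, bSynonyms, List.find?, e1, e2, e3, e4, r1, r2, r3, r4]

-- A's loop is the disjunction, over treatments, of "medication or a synonym occurs"
lemma aLoop_eq_any (abstraction : List (String × String)) (tp : List (List (String × String))) :
    aLoop abstraction tp =
      tp.any (fun t =>
        let med := PySem.Str.lower (pyGetD t "medication" "")
        let desc := PySem.Str.lower (pyGetD abstraction "description" "")
        PySem.Str.isIn med desc || (bSynGet med).any (fun a => PySem.Str.isIn a desc)) := by
  induction tp with
  | nil => rfl
  | cons t rest ih =>
    simp only [aLoop, List.any_cons, ih, ifchain, synGet_any, Bool.or_assoc]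

-- membership in B's accumulated term set
lemma mem_bFold (L : List String) (s : PySem.Set String) (y : String) :
    y ∈ L.foldl bStep s ↔ y ∈ s ∨ ∃ med ∈ L, y = med ∨ y ∈ bSynGet med := by
  induction L generalizing s with
  | nil => simp
  | cons m rest ih =>
    simp only [List.foldl_cons, ih, bStep, PySem.Set.mem_update, PySem.Set.mem_add,
      List.mem_cons]
    constructor
    · rintro (((h | h) | h) | ⟨med, hm, h⟩)
      · exact Or.inl h
      · exact Or.inr ⟨m, Or.inl rfl, Or.inl h⟩
      · exact Or.inr ⟨m, Or.inl rfl, Or.inr h⟩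
      · exact Or.inr ⟨med, Or.inr hm, h⟩
    · rintro (h | ⟨med, (rfl | hm), h⟩)
      · exact Or.inl (Or.inl (Or.inl h))
      · rcases h with h | h
        · exact Or.inl (Or.inl (Or.inr h))
        · exact Or.inl (Or.inr h)
      · exact Or.inr ⟨med, hm, h⟩

-- the final scan over the term set equals the disjunction over medications
lemma bFold_any (L : List String) (g : String → Bool) :
    ((L.foldl bStep PySem.Set.empty).any g = true) ↔
      ∃ med ∈ L, (g med = true ∨ ∃ a ∈ bSynGet med, g a = true) := by
  rw [List.any_eq_true]
  constructor
  · rintro ⟨y, hy, hg⟩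
    rcases (mem_bFold L PySem.Set.empty y).mp hy with h | ⟨med, hm, (rfl | hmem)⟩
    · cases h
    · exact ⟨y, hm, Or.inl hg⟩
    · exact ⟨med, hm, Or.inr ⟨y, hmem, hg⟩⟩
  · rintro ⟨med, hm, (hg | ⟨a, ha, hg⟩)⟩
    · exact ⟨med, (mem_bFold L PySem.Set.empty med).mpr (Or.inr ⟨med, hm, Or.inl rfl⟩), hg⟩
    · exact ⟨a, (mem_bFold L PySem.Set.empty a).mpr (Or.inr ⟨med, hm, Or.inr ha⟩), hg⟩

-- ===== VERDICT (by name: the statement is the Claim_ definition above) =====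
theorem treatment_matches_abstraction_py_spec : Claim_equal_treatment_matches_abstraction_py := by
  intro tp ab _ _
  show aLoop ab tp = _
  rw [aLoop_eq_any]
  unfold treatment_matches_abstraction_py_alt
  cases tp with
  | nil => rfl
  | cons t rest =>
    simp only [List.isEmpty_cons, if_neg Bool.false_ne_true]
    rw [Bool.eq_iff_iff]
    set desc := PySem.Str.lower (pyGetD ab "description" "") with hdesc
    set m : List (String × String) → String := fun t => PySem.Str.lower (pyGetD t "medication" "") with hm
    rw [List.any_eq_true, bFold_any]
    simp only [PySem.Set.mem_ofList, List.mem_map, List.any_eq_true, Bool.or_eq_true]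
    constructor
    · rintro ⟨x, hx, h⟩
      exact ⟨m x, ⟨x, hx, rfl⟩, h⟩
    · rintro ⟨med, ⟨x, hx, rfl⟩, h⟩
      exact ⟨x, hx, h⟩
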